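-- pv_equiv track=rewrite | github.com/AlbertLermaEs/TRNA_Library | TRNA_Library_LermaEscalera.py | calculate_stem_size
-- ===== SOURCE A (Python) =====
-- def calculate_stem_size(structure):
--     stem_size = 0
--     counter = 0
--
--     for character in structure:
--         if character == '(':
--             counter += 1
--         elif character == ')':
--             if counter > 0:
--                 stem_size += counter
--                 counter = 0
--
--     return stem_size
-- ===== SOURCE B (Python) =====
-- def calculate_stem_size(structure):
--     chars = list(structure)
--     last = -1
--     i = 0
--     for ch in chars:
--         if ch == ')':
--             last = i
--         i += 1
--     return sum(1 for ch in chars[:last + 1] if ch == '(')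
-- ===== Notes on version B (the rewrite author's own statement) =====
-- stated objective: alternative
-- what changed: Replaces the running-counter accumulation (count '(' since last ')' and flush at each ')') by a two-phase computation: find the index of the last ')' in one scan, then count '(' characters in the prefix before it.
import Mathlib
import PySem

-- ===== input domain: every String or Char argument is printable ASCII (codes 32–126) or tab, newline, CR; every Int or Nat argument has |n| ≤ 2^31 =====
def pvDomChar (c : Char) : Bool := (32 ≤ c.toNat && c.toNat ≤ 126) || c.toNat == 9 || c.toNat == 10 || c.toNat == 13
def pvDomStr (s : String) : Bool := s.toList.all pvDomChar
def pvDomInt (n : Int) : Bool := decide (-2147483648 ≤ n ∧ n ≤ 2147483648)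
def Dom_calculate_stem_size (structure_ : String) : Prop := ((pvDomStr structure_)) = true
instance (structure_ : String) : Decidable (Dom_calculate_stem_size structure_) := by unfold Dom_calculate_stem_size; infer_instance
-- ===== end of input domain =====

-- B computes the same value by finding the last ')' and counting '(' in the prefix before it, instead of A's running counter; same O(n) cost, different decomposition.

-- ===== PORT A =====
def calculate_stem_size (structure_ : String) : Int :=
  let r := structure_.toList.foldl (fun (st : Int × Int) character =>
      if character = '(' then (st.1, st.2 + 1)
      else if character = ')' then
        (if st.2 > 0 then (st.1 + st.2, 0) else st)
      else st) (0, 0)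
  r.1

-- ===== PORT B =====
def calculate_stem_size_alt (structure_ : String) : Int :=
  let chars := structure_.toList
  let st := chars.foldl (fun (st : Int × Int) ch =>
      ((if ch = ')' then st.2 else st.1), st.2 + 1)) (-1, 0)
  ((chars.take (st.1 + 1).toNat).filter (fun ch => ch = '(')).length

-- ===== PRECONDITION & SPEC =====
def Spec_calculate_stem_size (structure_ : String) (out : Int) : Prop := out = calculate_stem_size_alt structure_
instance (structure_ : String) (out : Int) : Decidable (Spec_calculate_stem_size structure_ out) := by unfold Spec_calculate_stem_size; infer_instance

-- ===== CLAIM (what is proved, stated in full; the proofs are below) =====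
def Claim_equal_calculate_stem_size : Prop := ∀ (structure_ : String), Dom_calculate_stem_size structure_ → Spec_calculate_stem_size structure_ (calculate_stem_size structure_)

-- ===== LEMMAS AND PROOFS =====

-- reference value: number of '(' strictly before the last ')' of the list (0 if no ')')
def pvG : List Char → Int
  | [] => 0
  | c :: t => if ')' ∈ t then (if c = '(' then 1 else 0) + pvG t else 0

-- index of the last ')' (meaningful only when ')' ∈ l)
def pvJ : List Char → Nat
  | [] => 0
  | _ :: t => if ')' ∈ t then pvJ t + 1 else 0

-- the loop bodies of the two ports, named so the induction lemmas can rewrite them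
def pvStepA (st : Int × Int) (character : Char) : Int × Int :=
  if character = '(' then (st.1, st.2 + 1)
  else if character = ')' then
    (if st.2 > 0 then (st.1 + st.2, 0) else st)
  else st

def pvStepB (st : Int × Int) (ch : Char) : Int × Int :=
  ((if ch = ')' then st.2 else st.1), st.2 + 1)

lemma pvG_no_close (l : List Char) (h : ')' ∉ l) : pvG l = 0 := by
  cases l with
  | nil => rfl
  | cons c t =>
    simp [pvG]
    intro ht; exact absurd (List.mem_cons_of_mem _ ht) h

lemma foldA_eq (l : List Char) (s k : Int) (hk : 0 ≤ k) :
    (l.foldl pvStepA (s, k)).1 = s + (if ')' ∈ l then k + pvG l else 0) := by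
  induction l generalizing s k with
  | nil => simp
  | cons c t ih =>
    rw [List.foldl_cons]
    by_cases hc : c = '('
    · subst hc
      have hst : pvStepA (s, k) '(' = (s, k + 1) := by simp [pvStepA]
      rw [hst, ih s (k + 1) (by omega)]
      by_cases ht : ')' ∈ t
      · simp [pvG, ht]; ring
      · simp [pvG, ht]
    · by_cases hc2 : c = ')'
      · subst hc2
        by_cases hk0 : k > 0
        · have hst : pvStepA (s, k) ')' = (s + k, 0) := by simp [pvStepA, hk0]
          rw [hst, ih (s + k) 0 le_rfl]
          by_cases ht : ')' ∈ t
          · simp [pvG, ht]; ring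
          · simp [pvG, ht]
        · have hk' : k = 0 := by omega
          have hst : pvStepA (s, k) ')' = (s, k) := by simp [pvStepA, hk0]
          rw [hst, ih s k hk, hk']
          by_cases ht : ')' ∈ t
          · simp [pvG, ht]
          · simp [pvG, ht]
      · have hst : pvStepA (s, k) c = (s, k) := by simp [pvStepA, hc, hc2]
        rw [hst, ih s k hk]
        have hm : (')' ∈ c :: t) ↔ (')' ∈ t) := by
          simp only [List.mem_cons]
          exact ⟨fun h => h.elim (fun h1 => absurd h1.symm hc2) id, Or.inr⟩
        rw [if_congr hm rfl rfl]
        have hg : pvG (c :: t) = pvG t := by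
          simp [pvG, hc]
          intro h1
          exact (pvG_no_close t h1).symm
        rw [hg]

lemma foldB_eq (l : List Char) (last0 i : Int) :
    (l.foldl pvStepB (last0, i)).1 = if ')' ∈ l then i + (pvJ l : Int) else last0 := by
  induction l generalizing last0 i with
  | nil => simp
  | cons c t ih =>
    rw [List.foldl_cons]
    by_cases hc : c = ')'
    · subst hc
      have hst : pvStepB (last0, i) ')' = (i, i + 1) := by simp [pvStepB]
      rw [hst, ih]
      by_cases ht : ')' ∈ t
      · simp [pvJ, ht]; ring
      · simp [pvJ, ht]
    · have hst : pvStepB (last0, i) c = (last0, i + 1) := by simp [pvStepB, hc]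
      rw [hst, ih]
      have hm : (')' ∈ c :: t) ↔ (')' ∈ t) := by
        simp only [List.mem_cons]
        exact ⟨fun h => h.elim (fun h1 => absurd h1.symm hc) id, Or.inr⟩
      rw [if_congr hm rfl rfl]
      by_cases ht : ')' ∈ t
      · simp [pvJ, ht]; ring
      · simp [ht]

lemma countB_eq (l : List Char) (h : ')' ∈ l) :
    (((l.take (pvJ l + 1)).filter (fun ch => ch = '(')).length : Int) = pvG l := by
  induction l with
  | nil => cases h
  | cons c t ih =>
    by_cases ht : ')' ∈ t
    · simp only [pvJ, pvG, if_pos ht, List.take_succ_cons, List.filter_cons]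
      rw [← ih ht]
      by_cases hc : c = '(' <;> simp [hc] <;> try omega
    · have hc : c = ')' := by
        rcases List.mem_cons.1 h with h1 | h1
        · exact h1.symm
        · exact absurd h1 ht
      subst hc
      simp [pvJ, pvG, ht]

-- ===== VERDICT (by name: the statement is the Claim_ definition above) =====
theorem calculate_stem_size_spec : Claim_equal_calculate_stem_size := by
  intro s _
  show calculate_stem_size s = calculate_stem_size_alt s
  have hA : calculate_stem_size s = (s.toList.foldl pvStepA (0, 0)).1 := rfl
  have hB : calculate_stem_size_alt s =
      ((s.toList.take (((s.toList.foldl pvStepB (-1, 0)).1 + 1).toNat)).filter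
        (fun ch => ch = '(')).length := rfl
  rw [hA, hB, foldA_eq s.toList 0 0 le_rfl, foldB_eq s.toList (-1) 0]
  by_cases h : ')' ∈ s.toList
  · rw [if_pos h, if_pos h]
    have h1 : ((0 : Int) + (pvJ s.toList : Int) + 1).toNat = pvJ s.toList + 1 := by omega
    rw [h1, countB_eq s.toList h]
    ring
  · rw [if_neg h, if_neg h]
    simp
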